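-- pv_equiv track=rewrite | github.com/benquick123/code-profiling | code/batch-2/vse-naloge-brez-testov/DN5-M-075.py | custva
-- ===== SOURCE A (Python) =====
-- def izloci_besedo(beseda):
--     a = ""
--     i = 0
--     for b in beseda:
--         if b.isalnum() == False:
--             i += 1
--         else:
--             a = beseda[i:]
--             break
--     i = 0
--     for b in a[::-1]:
--         if b.isalnum() == False:
--             i += 1
--         else:
--             if i == 0:
--                 break
--             else:
--                 a = a[:-i]
--                 break
--     return a
--
-- def custva(tweets, hashtags):
--     a = []
--     for tweet in tweets:
--         for hash in hashtags:
--             if hash in tweet: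
--                 temp = tweet.split()
--                 temp_char = izloci_besedo(temp[0])
--                 if temp_char not in a:
--                     a.append(temp_char)
--                     break
--                 else:
--                     break
--     result = sorted(a)
--     return result
-- ===== SOURCE B (Python) =====
-- def _first_word_core(tweet):
--     # One forward pass over the tweet's characters: skip leading whitespace,
--     # then walk the first word, flushing non-alphanumeric runs only when a
--     # later alphanumeric character proves they are interior.
--     res = ""
--     pending = ""
--     in_word = False
--     for c in tweet:
--         if c.isspace():
--             if in_word:
--                 break
--             continue
--         in_word = True
--         if c.isalnum():
--             res += pending + c
--             pending = ""
--         elif res: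
--             pending += c
--     return res
--
-- def custva(tweets, hashtags):
--     # Pass 1 (hashtag-major partition): repeatedly split the still-unmatched
--     # tweets on the next hashtag; a tweet leaves the pool as soon as it matches.
--     matched = []
--     unmatched = list(tweets)
--     for h in hashtags:
--         still = []
--         for t in unmatched:
--             if h in t:
--                 matched.append(t)
--             else:
--                 still.append(t)
--         unmatched = still
--     # Pass 2: trimmed first word of each matched tweet, dedup via a set, sort.
--     out = set()
--     for t in matched:
--         out.add(_first_word_core(t))
--     return sorted(out)
-- ===== Notes on version B (the rewrite author's own statement) =====
-- stated objective: alternative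
-- what changed: B restructures the whole computation: hashtag-major partition passes that drop each tweet from the unmatched pool as soon as it matches (instead of A's per-tweet scan of the hashtags with break), and each matched tweet's first word is trimmed by ONE forward character scan with a pending-run accumulator (no split(), no slicing, no string reversal, unlike A's split + two slice-and-reverse loops), with set dedup before sorting instead of A's list-membership test.
import Mathlib
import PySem

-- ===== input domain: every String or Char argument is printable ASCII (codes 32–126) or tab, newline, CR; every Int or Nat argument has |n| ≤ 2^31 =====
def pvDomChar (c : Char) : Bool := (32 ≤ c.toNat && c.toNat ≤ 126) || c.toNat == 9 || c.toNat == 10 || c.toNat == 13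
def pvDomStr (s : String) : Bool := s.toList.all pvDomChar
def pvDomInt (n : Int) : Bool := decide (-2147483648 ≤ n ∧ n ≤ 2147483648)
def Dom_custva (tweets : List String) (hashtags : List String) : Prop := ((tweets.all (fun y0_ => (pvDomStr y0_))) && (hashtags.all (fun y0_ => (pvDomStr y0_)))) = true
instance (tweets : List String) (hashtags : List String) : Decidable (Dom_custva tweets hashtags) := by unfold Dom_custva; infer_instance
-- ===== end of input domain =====

-- B stages the work differently (hashtag-major partition passes that drop a tweet from the
-- pool once it matches, then one forward character scan per matched tweet that trims its first
-- word with a pending-run accumulator, set dedup); RETURN values are proved equal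
-- (neither implementation mutates its arguments).

-- ===== PORT A =====
-- first loop of izloci_besedo: count leading non-alnum chars; a = beseda[i:] at the first alnum, else a = ""
def izlociLoop1 (full : List Char) : List Char → Nat → List Char
  | [], _ => []
  | b :: t, i =>
    if PySem.Chars.isalnum b = false then izlociLoop1 full t (i + 1)
    else full.drop i          -- beseda[i:] with i a count of dropped chars

-- second loop: over a[::-1] (= a.reverse), count trailing non-alnum; a[:-i] for i > 0 is a.take (a.length - i)
def izlociLoop2 (a : List Char) : List Char → Nat → List Char
  | [], _ => a
  | b :: t, i =>
    if PySem.Chars.isalnum b = false then izlociLoop2 a t (i + 1)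
    else if i = 0 then a else a.take (a.length - i)

def izlociBesedo (w : List Char) : List Char :=
  let a := izlociLoop1 w w 0
  izlociLoop2 a a.reverse 0

-- inner 'for hash in hashtags' loop: both branches of the hit case break
def custvaInner (tweet : String) (a : List String) : List String → List String
  | [] => a
  | h :: t =>
    if PySem.Str.isIn h tweet then
      -- temp[0]: Python raises IndexError when tweet.split() == []; those inputs are outside Pre_
      let tempChar := String.ofList (izlociBesedo ((PySem.Str.split₀ tweet).headD "").toList)
      if a.contains tempChar = false then a ++ [tempChar] else a
    else custvaInner tweet a t

def custva (tweets : List String) (hashtags : List String) : List String :=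
  let a := tweets.foldl (fun a tweet => custvaInner tweet a hashtags) []
  PySem.List.sorted a (fun x => x) false

-- ===== PORT B =====
-- the 'for t in unmatched' partition loop for one hashtag, state (matched, still)
def partInner (h : String) : List String → List String → List String → List String × List String
  | [], m, still => (m, still)
  | t :: ts, m, still =>
    if PySem.Str.isIn h t then partInner h ts (m ++ [t]) still
    else partInner h ts m (still ++ [t])

-- the 'for c in tweet' loop of _first_word_core, state (res, pending, in_word)
def coreScan : List Char → List Char → List Char → Bool → List Char
  | [], res, _, _ => res
  | c :: t, res, pending, inw =>
    if PySem.Chars.isspace c then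
      (if inw then res else coreScan t res pending inw)
    else if PySem.Chars.isalnum c then coreScan t (res ++ pending ++ [c]) [] true
    else if res ≠ [] then coreScan t res (pending ++ [c]) true
    else coreScan t res pending true

def firstWordCore (tweet : String) : String :=
  String.ofList (coreScan tweet.toList [] [] false)

def custva_alt (tweets : List String) (hashtags : List String) : List String :=
  let mu := hashtags.foldl (fun (mu : List String × List String) h => partInner h mu.2 mu.1 [])
    ([], tweets)
  let out : PySem.Set String :=
    mu.1.foldl (fun s t => PySem.Set.add s (firstWordCore t)) PySem.Set.empty
  PySem.List.sorted out (fun x => x) false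

-- ===== PRECONDITION & SPEC =====
-- Pre_ excludes exactly the inputs on which A raises IndexError: a tweet that contains some
-- hashtag but consists only of whitespace, so that tweet.split()[0] is out of range.
def Pre_custva (tweets : List String) (hashtags : List String) : Prop :=
  ∀ t ∈ tweets, (∃ h ∈ hashtags, PySem.Str.isIn h t = true) → PySem.Str.split₀ t ≠ []
instance (tweets : List String) (hashtags : List String) : Decidable (Pre_custva tweets hashtags) := by unfold Pre_custva; infer_instance

def pvWitness_custva : List String × List String := (["#yes hello!", "no tags here"], ["#yes", "#no"])

def Spec_custva (tweets : List String) (hashtags : List String) (out : List String) : Prop := out = custva_alt tweets hashtags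
instance (tweets : List String) (hashtags : List String) (out : List String) : Decidable (Spec_custva tweets hashtags out) := by unfold Spec_custva; infer_instance

-- ===== CLAIM (what is proved, stated in full; the proofs are below) =====
def Claim_equal_custva : Prop := ∀ (tweets : List String) (hashtags : List String), Dom_custva tweets hashtags → Pre_custva tweets hashtags → Spec_custva tweets hashtags (custva tweets hashtags)

-- ===== LEMMAS AND PROOFS =====

-- 'not b.isalnum()' / whitespace as Bool predicates, used only in the proofs
def nal : Char → Bool := fun b => !PySem.Chars.isalnum b
def nsp : Char → Bool := fun c => !PySem.Chars.isspace c

-- A's trimmed first word, as one function (proof-side abbreviation)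
def trimA (tweet : String) : String :=
  String.ofList (izlociBesedo ((PySem.Str.split₀ tweet).headD "").toList)

-- ---------- A's izloci_besedo = rdropWhile nal ∘ dropWhile nal ----------

lemma loop1_eq (l : List Char) : ∀ (full : List Char) (i : Nat), full.drop i = l →
    izlociLoop1 full l i = l.dropWhile nal := by
  induction l with
  | nil => intro full i _; simp [izlociLoop1]
  | cons b t ih =>
    intro full i h
    by_cases hb : PySem.Chars.isalnum b = false
    · have ht : full.drop (i + 1) = t := by rw [← List.tail_drop, h]; rfl
      simp [izlociLoop1, hb, List.dropWhile_cons, nal, ih full (i + 1) ht]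
    · have hb' : PySem.Chars.isalnum b = true := by revert hb; cases PySem.Chars.isalnum b <;> simp
      simp [izlociLoop1, hb', List.dropWhile_cons, nal, h]

lemma loop2_eq (l : List Char) : ∀ (a : List Char) (i : Nat), a.reverse.drop i = l →
    l.any (fun b => PySem.Chars.isalnum b) = true →
    izlociLoop2 a l i = a.take (a.length - (i + (l.takeWhile nal).length)) := by
  induction l with
  | nil => intro a i _ hany; simp at hany
  | cons b t ih =>
    intro a i h hany
    by_cases hb : PySem.Chars.isalnum b = false
    · have ht : a.reverse.drop (i + 1) = t := by rw [← List.tail_drop, h]; rfl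
      have hany' : t.any (fun b => PySem.Chars.isalnum b) = true := by
        simpa [List.any_cons, hb] using hany
      have htw : ((b :: t).takeWhile nal).length = (t.takeWhile nal).length + 1 := by
        simp [List.takeWhile_cons, nal, hb]
      rw [show izlociLoop2 a (b :: t) i = izlociLoop2 a t (i + 1) by simp [izlociLoop2, hb]]
      rw [ih a (i + 1) ht hany', htw]
      congr 1
      omega
    · have hb' : PySem.Chars.isalnum b = true := by revert hb; cases PySem.Chars.isalnum b <;> simp
      have htw : ((b :: t).takeWhile nal).length = 0 := by simp [List.takeWhile_cons, nal, hb']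
      rw [htw]
      by_cases hi : i = 0
      · subst hi; simp [izlociLoop2, hb']
      · simp [izlociLoop2, hb', hi]

lemma dropWhile_eq_drop_len (p : Char → Bool) (v : List Char) :
    v.dropWhile p = v.drop (v.takeWhile p).length := by
  induction v with
  | nil => rfl
  | cons c t ih => by_cases hc : p c <;> simp [List.dropWhile_cons, List.takeWhile_cons, hc, ih]

lemma nal_head (p : Char → Bool) (l : List Char) {c : Char} {rest : List Char}
    (h : l.dropWhile p = c :: rest) : p c = false := by
  induction l with
  | nil => simp at h
  | cons b t ih =>
    rw [List.dropWhile_cons] at h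
    by_cases hb : p b = true
    · rw [if_pos hb] at h
      exact ih h
    · rw [if_neg hb] at h
      cases h
      simpa using hb

lemma izloci_eq_rdrop (w : List Char) :
    izlociBesedo w = List.rdropWhile nal (w.dropWhile nal) := by
  unfold izlociBesedo
  rw [loop1_eq w w 0 (by simp)]
  rcases ha : w.dropWhile nal with _ | ⟨c, rest⟩
  · simp [izlociLoop2, List.rdropWhile]
  · have hc : nal c = false := nal_head nal w ha
    have hcal : PySem.Chars.isalnum c = true := by simpa [nal] using hc
    have hany : ((c :: rest).reverse).any (fun b => PySem.Chars.isalnum b) = true := by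
      simp only [List.any_eq_true]
      exact ⟨c, by simp, hcal⟩
    rw [loop2_eq ((c :: rest).reverse) (c :: rest) 0 rfl hany]
    rw [show List.rdropWhile nal (c :: rest) = ((c :: rest).reverse.dropWhile nal).reverse from rfl]
    rw [dropWhile_eq_drop_len, List.reverse_drop]
    simp

lemma inner_eq (tweet : String) (hs : List String) (a : List String) :
    custvaInner tweet a hs =
      if hs.any (fun h => PySem.Str.isIn h tweet) then PySem.Set.add a (trimA tweet) else a := by
  induction hs with
  | nil => simp [custvaInner]
  | cons h t ih =>
    by_cases hh : PySem.Chars.isIn h.toList tweet.toList = true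
    · by_cases hc : trimA tweet ∈ a
      · simp [custvaInner, trimA, PySem.Set.add, hh, hc]
      · simp [custvaInner, trimA, PySem.Set.add, hh, hc]
    · simp only [custvaInner, PySem.Str.isIn_eq, hh, if_false, Bool.false_eq_true, ih]
      simp [hh]

-- ---------- rdropWhile helpers ----------

lemma rdrop_cons (p : Char → Bool) (c : Char) (t : List Char) (hc : p c = false) :
    List.rdropWhile p (c :: t) = c :: List.rdropWhile p t := by
  show (List.dropWhile p (c :: t).reverse).reverse = _
  rw [List.reverse_cons, List.dropWhile_append]
  by_cases h : (List.dropWhile p t.reverse).isEmpty = true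
  · have ht : List.rdropWhile p t = [] := by
      show (List.dropWhile p t.reverse).reverse = []
      simpa [List.isEmpty_iff] using h
    simp [h, List.dropWhile_cons, hc, ht]
  · rw [if_neg h, List.reverse_append, List.reverse_singleton]
    show c :: (List.dropWhile p t.reverse).reverse = _
    rfl

lemma rdrop_append (p : Char → Bool) (l1 l2 : List Char) (h : List.rdropWhile p l2 ≠ []) :
    List.rdropWhile p (l1 ++ l2) = l1 ++ List.rdropWhile p l2 := by
  show (List.dropWhile p (l1 ++ l2).reverse).reverse = _
  rw [List.reverse_append, List.dropWhile_append]
  have h2 : (List.dropWhile p l2.reverse).isEmpty = false := by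
    rcases hh : List.dropWhile p l2.reverse with _ | _
    · exact absurd (by show (List.dropWhile p l2.reverse).reverse = []; rw [hh]; rfl) h
    · rfl
  rw [h2]
  simp only [Bool.false_eq_true, if_false, List.reverse_append, List.reverse_reverse]
  rfl

-- ---------- B's word scan ----------

-- the scan restricted to the first word (after in_word is true, whitespace breaks)
def wordScan : List Char → List Char → List Char → List Char
  | [], res, _ => res
  | c :: t, res, pending =>
    if PySem.Chars.isalnum c then wordScan t (res ++ pending ++ [c]) []
    else if res ≠ [] then wordScan t res (pending ++ [c])
    else wordScan t res pending

lemma wordScan_eq (t : List Char) : ∀ (res pending : List Char), res ≠ [] →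
    (∀ c ∈ pending, nal c = true) →
    wordScan t res pending = res ++ List.rdropWhile nal (pending ++ t) := by
  induction t with
  | nil =>
    intro res pending _ hp
    simp [wordScan, List.rdropWhile_eq_nil_iff.mpr (by simpa using hp)]
  | cons c t ih =>
    intro res pending hres hp
    by_cases hc : PySem.Chars.isalnum c = true
    · have hcnal : nal c = false := by simp [nal, hc]
      rw [show wordScan (c :: t) res pending = wordScan t (res ++ pending ++ [c]) [] by
        simp [wordScan, hc]]
      rw [ih _ [] (by simp) (by simp)]
      have : List.rdropWhile nal (pending ++ c :: t) = pending ++ c :: List.rdropWhile nal t := by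
        rw [rdrop_append nal pending (c :: t) (by rw [rdrop_cons nal c t hcnal]; simp),
          rdrop_cons nal c t hcnal]
      rw [this]
      simp
    · have hcnal : nal c = true := by simp [nal]; revert hc; cases PySem.Chars.isalnum c <;> simp
      rw [show wordScan (c :: t) res pending = wordScan t res (pending ++ [c]) by
        simp [wordScan, hc, hres]]
      rw [ih res (pending ++ [c]) hres (by intro x hx; rcases List.mem_append.mp hx with h | h
                                           · exact hp x h
                                           · simpa [List.mem_singleton.mp h] using hcnal)]
      simp

lemma wordScan_start (w : List Char) :
    wordScan w [] [] = List.rdropWhile nal (w.dropWhile nal) := by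
  induction w with
  | nil => simp [wordScan, List.rdropWhile]
  | cons c t ih =>
    by_cases hc : PySem.Chars.isalnum c = true
    · have hcnal : nal c = false := by simp [nal, hc]
      rw [show wordScan (c :: t) [] [] = wordScan t [c] [] by simp [wordScan, hc]]
      rw [wordScan_eq t [c] [] (by simp) (by simp)]
      rw [List.dropWhile_cons, if_neg (by simp [hcnal])]
      rw [rdrop_cons nal c t hcnal]
      simp
    · rw [show wordScan (c :: t) [] [] = wordScan t [] [] by simp [wordScan, hc]]
      rw [List.dropWhile_cons, if_pos (by simp [nal]; revert hc; cases PySem.Chars.isalnum c <;> simp)]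
      exact ih

-- coreScan with in_word = true scans exactly the first-word prefix
lemma coreScan_word (t : List Char) : ∀ (res pending : List Char),
    coreScan t res pending true = wordScan (t.takeWhile nsp) res pending := by
  induction t with
  | nil => intro res pending; simp [coreScan, wordScan]
  | cons c t ih =>
    intro res pending
    by_cases hs : PySem.Chars.isspace c = true
    · simp [coreScan, hs, List.takeWhile_cons, nsp, wordScan]
    · by_cases hc : PySem.Chars.isalnum c = true
      · simp [coreScan, hs, hc, List.takeWhile_cons, nsp, wordScan, ih]
      · by_cases hr : res = []
        · simp [coreScan, hs, hc, hr, List.takeWhile_cons, nsp, wordScan, ih]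
        · simp [coreScan, hs, hc, hr, List.takeWhile_cons, nsp, wordScan, ih]

lemma coreScan_skip (s : List Char) :
    coreScan s [] [] false = coreScan (s.dropWhile (fun c => PySem.Chars.isspace c)) [] [] false := by
  induction s with
  | nil => rfl
  | cons c t ih =>
    by_cases hs : PySem.Chars.isspace c = true
    · simpa [coreScan, hs, List.dropWhile_cons] using ih
    · simp [List.dropWhile_cons, hs]

lemma core_eq (l : List Char) :
    coreScan l [] [] false =
      List.rdropWhile nal
        (((l.dropWhile (fun c => PySem.Chars.isspace c)).takeWhile nsp).dropWhile nal) := by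
  rw [coreScan_skip]
  rcases hu : l.dropWhile (fun c => PySem.Chars.isspace c) with _ | ⟨c, rest⟩
  · simp [coreScan, List.rdropWhile]
  · have hc : PySem.Chars.isspace c = false := by
      have := nal_head (fun c => PySem.Chars.isspace c) l hu
      simpa using this
    have step : coreScan (c :: rest) [] [] false = coreScan (c :: rest) [] [] true := by
      by_cases ha : PySem.Chars.isalnum c = true
      · simp [coreScan, hc, ha]
      · simp [coreScan, hc, ha]
    rw [step, coreScan_word, wordScan_start]

-- ---------- head of split₀ ----------

lemma go_prefix (s : List Char) : ∀ (cur : List Char) (acc : List (List Char)),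
    ∃ ex, PySem.Chars.split₀.go s cur acc = acc.reverse ++ ex := by
  induction s with
  | nil =>
    intro cur acc
    by_cases h : cur.isEmpty = true
    · exact ⟨[], by simp [PySem.Chars.split₀.go, h]⟩
    · exact ⟨[cur.reverse], by simp [PySem.Chars.split₀.go, h]⟩
  | cons c t ih =>
    intro cur acc
    by_cases hs : PySem.Chars.isspace c = true
    · by_cases hcur : cur.isEmpty = true
      · obtain ⟨ex, hex⟩ := ih [] acc
        exact ⟨ex, by simp [PySem.Chars.split₀.go, hs, hcur, hex]⟩
      · obtain ⟨ex, hex⟩ := ih [] (cur.reverse :: acc)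
        exact ⟨cur.reverse :: ex, by simp [PySem.Chars.split₀.go, hs, hcur, hex]⟩
    · obtain ⟨ex, hex⟩ := ih (c :: cur) acc
      exact ⟨ex, by simp [PySem.Chars.split₀.go, hs, hex]⟩

lemma go_word (s : List Char) : ∀ (cur : List Char), cur ≠ [] →
    (PySem.Chars.split₀.go s cur []).headD [] = cur.reverse ++ s.takeWhile nsp := by
  induction s with
  | nil =>
    intro cur hcur
    simp [PySem.Chars.split₀.go, List.isEmpty_iff, hcur]
  | cons c t ih =>
    intro cur hcur
    by_cases hs : PySem.Chars.isspace c = true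
    · obtain ⟨ex, hex⟩ := go_prefix t [] [cur.reverse]
      simp [PySem.Chars.split₀.go, hs, List.isEmpty_iff, hcur, hex, List.takeWhile_cons, nsp]
    · rw [show PySem.Chars.split₀.go (c :: t) cur [] = PySem.Chars.split₀.go t (c :: cur) [] by
        simp [PySem.Chars.split₀.go, hs]]
      rw [ih (c :: cur) (by simp), List.takeWhile_cons, if_pos (by simp [nsp, hs])]
      simp

lemma split_head (s : List Char) :
    (PySem.Chars.split₀ s).headD [] =
      (s.dropWhile (fun c => PySem.Chars.isspace c)).takeWhile nsp := by
  unfold PySem.Chars.split₀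
  have hskip : ∀ (u : List Char), PySem.Chars.split₀.go u [] [] =
      PySem.Chars.split₀.go (u.dropWhile (fun c => PySem.Chars.isspace c)) [] [] := by
    intro u
    induction u with
    | nil => rfl
    | cons c t ih =>
      by_cases hs : PySem.Chars.isspace c = true
      · simpa [PySem.Chars.split₀.go, hs, List.dropWhile_cons] using ih
      · simp [List.dropWhile_cons, hs]
  rw [hskip]
  rcases hu : s.dropWhile (fun c => PySem.Chars.isspace c) with _ | ⟨c, rest⟩
  · simp [PySem.Chars.split₀.go]
  · have hc : PySem.Chars.isspace c = false := by
      have := nal_head (fun c => PySem.Chars.isspace c) s hu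
      simpa using this
    rw [show PySem.Chars.split₀.go (c :: rest) [] [] = PySem.Chars.split₀.go rest [c] [] by
      simp [PySem.Chars.split₀.go, hc]]
    rw [go_word rest [c] (by simp), List.takeWhile_cons, if_pos (by simp [nsp, hc])]
    simp

-- ---------- per-tweet: A's trim = B's trim ----------

lemma trim_eq (tweet : String) : trimA tweet = firstWordCore tweet := by
  unfold trimA firstWordCore
  rw [core_eq, izloci_eq_rdrop]
  congr 2
  have : (PySem.Str.split₀ tweet).headD "" =
      String.ofList ((PySem.Chars.split₀ tweet.toList).headD []) := by
    unfold PySem.Str.split₀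
    rcases PySem.Chars.split₀ tweet.toList with _ | ⟨w, ws⟩
    · rfl
    · rfl
  rw [this, split_head]
  simp

-- ---------- the hit list ----------

lemma partInner_eq (h : String) (ts : List String) : ∀ (m still : List String),
    partInner h ts m still =
      (m ++ ts.filter (fun t => PySem.Str.isIn h t),
       still ++ ts.filter (fun t => !PySem.Str.isIn h t)) := by
  induction ts with
  | nil => intro m still; simp [partInner]
  | cons t ts ih =>
    intro m still
    by_cases ht : PySem.Str.isIn h t = true
    · have ht' : PySem.Chars.isIn h.toList t.toList = true := by simpa using ht
      rw [show partInner h (t :: ts) m still = partInner h ts (m ++ [t]) still by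
        simp only [partInner]; rw [if_pos ht]]
      rw [ih]
      simp [List.filter_cons, ht']
    · have ht' : PySem.Chars.isIn h.toList t.toList = false := by simpa using ht
      rw [show partInner h (t :: ts) m still = partInner h ts m (still ++ [t]) by
        simp only [partInner]; rw [if_neg ht]]
      rw [ih]
      simp [List.filter_cons, ht']

lemma mem_matched (hs : List String) : ∀ (m u : List String) (x : String),
    x ∈ (hs.foldl (fun (mu : List String × List String) h => partInner h mu.2 mu.1 []) (m, u)).1 ↔
      x ∈ m ∨ (x ∈ u ∧ ∃ h ∈ hs, PySem.Str.isIn h x = true) := by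
  induction hs with
  | nil => intro m u x; simp
  | cons h hs ih =>
    intro m u x
    rw [List.foldl_cons]
    rw [show partInner h (m, u).2 (m, u).1 [] =
      (m ++ u.filter (fun t => PySem.Str.isIn h t),
       [] ++ u.filter (fun t => !PySem.Str.isIn h t)) from partInner_eq h u m []]
    rw [ih]
    simp only [List.mem_append, List.mem_filter, List.nil_append, List.mem_cons,
      Bool.not_eq_eq_eq_not, Bool.not_true]
    by_cases hx : PySem.Str.isIn h x = true
    · constructor
      · rintro (⟨h1 | ⟨h1, -⟩⟩ | ⟨⟨h1, -⟩, h2⟩) <;> tauto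
      · rintro (h1 | ⟨h1, h2⟩)
        · tauto
        · exact Or.inl (Or.inr ⟨h1, hx⟩)
    · constructor
      · rintro (⟨h1 | ⟨h1, hbad⟩⟩ | ⟨⟨h1, -⟩, h2, h3, h4⟩)
        · tauto
        · rw [hbad] at hx; exact absurd rfl hx
        · exact Or.inr ⟨h1, h2, Or.inr h3, h4⟩
      · rintro (h1 | ⟨h1, h2, h3 | h3, h4⟩)
        · tauto
        · rw [h3] at h4; exact absurd h4 hx
        · exact Or.inr ⟨⟨h1, by revert hx; cases PySem.Str.isIn h x <;> simp⟩, h2, h3, h4⟩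

lemma mem_foldl_add_if (p : String → Bool) (f : String → String) (L : List String) :
    ∀ (s0 : List String) (x : String),
    x ∈ L.foldl (fun s t => if p t then PySem.Set.add s (f t) else s) s0 ↔
      x ∈ s0 ∨ ∃ t ∈ L, p t = true ∧ f t = x := by
  induction L with
  | nil => intro s0 x; simp
  | cons t L ih =>
    intro s0 x
    rw [List.foldl_cons]
    by_cases ht : p t = true
    · rw [if_pos ht, ih, PySem.Set.mem_add]
      constructor
      · rintro (⟨h1 | h1⟩ | h1)
        · tauto
        · exact Or.inr ⟨t, by simp, ht, h1.symm⟩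
        · obtain ⟨u, hu, hp, hf⟩ := h1
          exact Or.inr ⟨u, by simp [hu], hp, hf⟩
      · rintro (h1 | ⟨u, hu, hp, hf⟩)
        · tauto
        · rcases List.mem_cons.mp hu with h | h
          · subst h; exact Or.inl (Or.inr hf.symm)
          · exact Or.inr ⟨u, h, hp, hf⟩
    · rw [if_neg ht, ih]
      constructor
      · rintro (h1 | ⟨u, hu, hp, hf⟩)
        · tauto
        · exact Or.inr ⟨u, by simp [hu], hp, hf⟩
      · rintro (h1 | ⟨u, hu, hp, hf⟩)
        · tauto
        · rcases List.mem_cons.mp hu with h | h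
          · subst h; rw [hp] at ht; exact absurd rfl ht
          · exact Or.inr ⟨u, h, hp, hf⟩

lemma mem_foldl_add (f : String → String) (L : List String) :
    ∀ (s0 : List String) (x : String),
    x ∈ L.foldl (fun s t => PySem.Set.add s (f t)) s0 ↔ x ∈ s0 ∨ ∃ t ∈ L, f t = x := by
  induction L with
  | nil => intro s0 x; simp
  | cons t L ih =>
    intro s0 x
    rw [List.foldl_cons, ih, PySem.Set.mem_add]
    constructor
    · rintro (⟨h1 | h1⟩ | ⟨u, hu, hf⟩)
      · tauto
      · exact Or.inr ⟨t, by simp, h1.symm⟩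
      · exact Or.inr ⟨u, by simp [hu], hf⟩
    · rintro (h1 | ⟨u, hu, hf⟩)
      · tauto
      · rcases List.mem_cons.mp hu with h | h
        · subst h; exact Or.inl (Or.inr hf.symm)
        · exact Or.inr ⟨u, h, hf⟩

lemma nodup_foldl_add_if (p : String → Bool) (f : String → String) (L : List String) :
    ∀ (s0 : List String), s0.Nodup →
    (L.foldl (fun s t => if p t then PySem.Set.add s (f t) else s) s0).Nodup := by
  induction L with
  | nil => intro s0 h; exact h
  | cons t L ih =>
    intro s0 h
    rw [List.foldl_cons]
    by_cases ht : p t = true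
    · rw [if_pos ht]; exact ih _ (PySem.Set.nodup_add s0 (f t) h)
    · rw [if_neg ht]; exact ih _ h

lemma nodup_foldl_add (f : String → String) (L : List String) :
    ∀ (s0 : List String), s0.Nodup →
    (L.foldl (fun s t => PySem.Set.add s (f t)) s0).Nodup := by
  induction L with
  | nil => intro s0 h; exact h
  | cons t L ih => intro s0 h; rw [List.foldl_cons]; exact ih _ (PySem.Set.nodup_add s0 (f t) h)

-- ===== VERDICT (by name: the statement is the Claim_ definition above) =====
theorem custva_spec : Claim_equal_custva := by
  intro tweets hashtags _ _
  unfold Spec_custva custva custva_alt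
  dsimp only
  have hfun : (fun (a : List String) tweet => custvaInner tweet a hashtags) =
      (fun (s : List String) (t : String) =>
        if hashtags.any (fun h => PySem.Str.isIn h t) then PySem.Set.add s (firstWordCore t)
        else s) := by
    funext a tweet
    rw [inner_eq, trim_eq]
  rw [hfun]
  rw [PySem.List.sorted_id_eq_sorted_id_iff_perm]
  rw [List.perm_ext_iff_of_nodup
    (nodup_foldl_add_if _ firstWordCore tweets [] List.nodup_nil)
    (nodup_foldl_add firstWordCore _ PySem.Set.empty List.nodup_nil)]
  intro x
  rw [mem_foldl_add_if, mem_foldl_add]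
  simp only [List.mem_nil_iff, false_or, PySem.Set.empty]
  constructor
  · rintro ⟨t, htw, hp, hx⟩
    exact ⟨t, (mem_matched hashtags [] tweets t).mpr
      (Or.inr ⟨htw, by simpa [List.any_eq_true] using hp⟩), hx⟩
  · rintro ⟨t, htm, hx⟩
    rcases (mem_matched hashtags [] tweets t).mp htm with h | ⟨htw, hh⟩
    · simp at h
    · exact ⟨t, htw, by simpa [List.any_eq_true] using hh, hx⟩
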